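-- pv_equiv track=rewrite | github.com/Kodsport/swedish-olympiad-2015 | onlinekval/hesthoppning/data/gen_testcase.py | solve
-- ===== SOURCE A (Python) =====
-- dr = [-2,-2,-1,-1,1,1,2,2]
--
-- dc = [-1,1,-2,2,-2,2,-1,1]
--
-- def get_hpos(N, M, grid):
--     hPos = [[0,0],[0,0]]
--     hi = 0
--     for i in range(N):
--         for j in range(M):
--             if grid[i][j] == 'H':
--                 hPos[hi] = [i,j]
--                 hi += 1
--     return hPos
--
-- def solve(N, M, grid):
--     hPos = get_hpos(N, M, grid)
--     q = []
--     vis = [[False for _ in range(M)] for _ in range(N)]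
--     q.append(hPos[0])
--     vis[hPos[0][0]][hPos[0][1]] = True
--     while q:
--         r,c = q.pop()
--         for i in range(8):
--             nr = r + dr[i]
--             nc = c + dc[i]
--             if nr >= 0 and nr < N and nc >= 0 and nc < M and grid[nr][nc] != '#' and not vis[nr][nc]:
--                 vis[nr][nc] = True
--                 q.append([nr,nc])
--     return vis[hPos[1][0]][hPos[1][1]]
-- ===== SOURCE B (Python) =====
-- # Union-find (disjoint-set) connected components over the whole grid instead of
-- # A's outward DFS search: union every passable pair of knight-adjacent cells,
-- # then test whether the two H cells share a root (objective: alternative algorithm).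
-- OFFS = ((-2, -1), (-2, 1), (-1, -2), (-1, 2), (1, -2), (1, 2), (2, -1), (2, 1))
--
-- def solve(N, M, grid):
--     parent = list(range(N * M))
--
--     def find(x):
--         # union-by-min keeps parent[x] <= x, so this walk strictly decreases
--         while parent[x] != x:
--             x = parent[x]
--         return x
--
--     for i in range(N):
--         for j in range(M):
--             if grid[i][j] == '#':
--                 continue
--             for a, b in OFFS:
--                 ni, nj = i + a, j + b
--                 if 0 <= ni < N and 0 <= nj < M and grid[ni][nj] != '#':
--                     ra, rb = find(i * M + j), find(ni * M + nj)
--                     if ra != rb: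
--                         parent[max(ra, rb)] = min(ra, rb)
--
--     hs = [(i, j) for i in range(N) for j in range(M) if grid[i][j] == 'H']
--     s = hs[0] if hs else (0, 0)
--     t = hs[1] if len(hs) > 1 else (0, 0)
--     return find(s[0] * M + s[1]) == find(t[0] * M + t[1])
-- ===== Notes on version B (the rewrite author's own statement) =====
-- stated objective: alternative
-- what changed: Replaces A's stack-based DFS flood fill from the first H with a global union-find (disjoint-set) over all N*M cell indices: every passable pair of knight-adjacent cells is unioned (union-by-min root, so parent[x] <= x and find is a plain parent walk), and the answer is whether the two H cells' roots coincide; there is no search stack, queue or visited matrix at all.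
import Mathlib
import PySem

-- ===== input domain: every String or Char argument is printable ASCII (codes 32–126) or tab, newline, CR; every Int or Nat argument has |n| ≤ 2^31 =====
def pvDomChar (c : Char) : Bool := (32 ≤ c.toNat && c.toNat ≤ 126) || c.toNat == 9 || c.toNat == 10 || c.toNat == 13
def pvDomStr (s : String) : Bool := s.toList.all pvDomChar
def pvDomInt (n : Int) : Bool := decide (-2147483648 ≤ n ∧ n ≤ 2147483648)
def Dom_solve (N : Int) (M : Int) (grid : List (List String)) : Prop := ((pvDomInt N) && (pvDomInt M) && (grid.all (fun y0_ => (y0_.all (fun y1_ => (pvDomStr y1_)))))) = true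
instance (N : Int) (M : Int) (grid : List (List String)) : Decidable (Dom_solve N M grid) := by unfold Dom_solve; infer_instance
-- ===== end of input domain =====

-- B replaces A's stack-DFS flood fill by a global union-find over all grid cells:
-- union every passable pair of knight-adjacent cells, then compare the two H cells'
-- roots (objective: alternative algorithm, no search stack or visited matrix).

-- ===== PORT A =====
-- Stack DFS, as in the Python. The Lean stack keeps its top at the HEAD
-- (Python appends and pops at the END of its list q).
-- Grid/vis cells are read with List.getD at nonnegative indices; under Pre_solve every
-- grid access is in range, exactly where Python's indexing returns instead of raising.
-- The loop carries fuel 9*N*M+2; that always exceeds the loop's decreasing measure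
-- 9*(unvisited cells) + |q| (proved below), so the fuel-0 branch is never taken.
def drA : List Int := [-2, -2, -1, -1, 1, 1, 2, 2]
def dcA : List Int := [-1, 1, -2, 2, -2, 2, -1, 1]

def getHpos (N M : Int) (grid : List (List String)) : (Int × Int) × (Int × Int) :=
  ((PySem.List.pyRange 0 N 1).foldl (fun st i =>
    (PySem.List.pyRange 0 M 1).foldl
      (fun (st : ((Int × Int) × (Int × Int)) × Int) j =>
        if (grid.getD i.toNat []).getD j.toNat "" = "H" then
          (if st.2 = 0 then (((i, j), st.1.2), st.2 + 1)
           else if st.2 = 1 then ((st.1.1, (i, j)), st.2 + 1)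
           else (st.1, st.2 + 1))   -- a third 'H': Python raises IndexError; excluded by Pre_solve
        else st) st)
    (((0, 0), (0, 0)), (0 : Int))).1

def vget (vis : List (List Bool)) (p : Int × Int) : Bool :=
  (vis.getD p.1.toNat []).getD p.2.toNat false

def vset (vis : List (List Bool)) (p : Int × Int) : List (List Bool) :=
  vis.set p.1.toNat ((vis.getD p.1.toNat []).set p.2.toNat true)

def dfsStep (N M : Int) (grid : List (List String)) (r c : Int)
    (st : List (Int × Int) × List (List Bool)) (i : Int) :
    List (Int × Int) × List (List Bool) :=
  let nr := r + drA.getD i.toNat 0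
  let nc := c + dcA.getD i.toNat 0
  if 0 ≤ nr ∧ nr < N ∧ 0 ≤ nc ∧ nc < M ∧ (grid.getD nr.toNat []).getD nc.toNat "" ≠ "#"
      ∧ vget st.2 (nr, nc) = false then
    ((nr, nc) :: st.1, vset st.2 (nr, nc))
  else st

def dfsLoop (N M : Int) (grid : List (List String)) :
    Nat → List (Int × Int) → List (List Bool) → List (List Bool)
  | 0, _, vis => vis
  | _ + 1, [], vis => vis
  | fuel + 1, (r, c) :: q, vis =>
      let st := (PySem.List.pyRange 0 8 1).foldl (dfsStep N M grid r c) (q, vis)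
      dfsLoop N M grid fuel st.1 st.2

def solve (N : Int) (M : Int) (grid : List (List String)) : Bool :=
  let h := getHpos N M grid
  let vis0 : List (List Bool) := List.replicate N.toNat (List.replicate M.toNat false)
  let vis1 := vset vis0 h.1
  let visF := dfsLoop N M grid (9 * (N.toNat * M.toNat) + 2) [h.1] vis1
  vget visF h.2

-- ===== PORT B =====
-- Union-find over the N*M cell indices r*M+c (port of Source B).
def offsB : List (Int × Int) := [(-2, -1), (-2, 1), (-1, -2), (-1, 2), (1, -2), (1, 2), (2, -1), (2, 1)]

def hlist (N M : Int) (grid : List (List String)) : List (Int × Int) :=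
  (PySem.List.pyRange 0 N 1).flatMap (fun i =>
    ((PySem.List.pyRange 0 M 1).filter
      (fun j => (grid.getD i.toNat []).getD j.toNat "" = "H")).map (fun j => (i, j)))

-- Python's `while parent[x] != x: x = parent[x]`. Union-by-min keeps every link
-- parent[x] ≤ x (strict decrease along the walk, proved below), so fuel x+1 always
-- suffices and the fuel-0 branch is never taken.
def ufFind (parent : List Nat) : Nat → Nat → Nat
  | 0, x => x
  | fuel + 1, x =>
      if parent.getD x x = x then x else ufFind parent fuel (parent.getD x x)

def ufUnite (N M : Int) (grid : List (List String)) (i j : Int)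
    (parent : List Nat) (ab : Int × Int) : List Nat :=
  let ni := i + ab.1
  let nj := j + ab.2
  if 0 ≤ ni ∧ ni < N ∧ 0 ≤ nj ∧ nj < M ∧ (grid.getD ni.toNat []).getD nj.toNat "" ≠ "#" then
    let ra := ufFind parent ((i * M + j).toNat + 1) (i * M + j).toNat
    let rb := ufFind parent ((ni * M + nj).toNat + 1) (ni * M + nj).toNat
    if ra ≠ rb then parent.set (max ra rb) (min ra rb) else parent
  else parent

def buildUF (N M : Int) (grid : List (List String)) : List Nat :=
  (PySem.List.pyRange 0 N 1).foldl (fun par i =>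
    (PySem.List.pyRange 0 M 1).foldl (fun par j =>
      if (grid.getD i.toNat []).getD j.toNat "" = "#" then par
      else offsB.foldl (ufUnite N M grid i j) par) par)
    (List.range (N * M).toNat)

def solve_alt (N : Int) (M : Int) (grid : List (List String)) : Bool :=
  let parent := buildUF N M grid
  let hs := hlist N M grid
  let s := hs.getD 0 (0, 0)
  let t := hs.getD 1 (0, 0)
  decide (ufFind parent ((s.1 * M + s.2).toNat + 1) (s.1 * M + s.2).toNat
        = ufFind parent ((t.1 * M + t.2).toNat + 1) (t.1 * M + t.2).toNat)

-- ===== PRECONDITION & SPEC =====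
-- Pre_solve is exactly the set of inputs on which the Python A returns normally:
-- positive dimensions (else vis[0][0] raises IndexError), a grid that actually has the
-- scanned N×M rectangle (else grid[i][j] raises IndexError), and at most two 'H' cells
-- in that rectangle (a third makes hPos[hi] raise IndexError).
def Pre_solve (N : Int) (M : Int) (grid : List (List String)) : Prop :=
  0 < N ∧ 0 < M ∧ N ≤ (grid.length : Int) ∧
  (∀ row ∈ grid.take N.toNat, M ≤ (row.length : Int)) ∧
  ((grid.take N.toNat).map (fun row => (row.take M.toNat).count "H")).sum ≤ 2
instance (N : Int) (M : Int) (grid : List (List String)) : Decidable (Pre_solve N M grid) := by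
  unfold Pre_solve; infer_instance

def pvWitness_solve : Int × Int × List (List String) :=
  (2, 3, [["H", ".", "#"], ["#", "#", "H"]])

def Spec_solve (N : Int) (M : Int) (grid : List (List String)) (out : Bool) : Prop := out = solve_alt N M grid
instance (N : Int) (M : Int) (grid : List (List String)) (out : Bool) : Decidable (Spec_solve N M grid out) := by unfold Spec_solve; infer_instance

-- ===== CLAIM (what is proved, stated in full; the proofs are below) =====
def Claim_equal_solve : Prop := ∀ (N : Int) (M : Int) (grid : List (List String)), Dom_solve N M grid → Pre_solve N M grid → Spec_solve N M grid (solve N M grid)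

-- ===== LEMMAS AND PROOFS =====

-- ----- the abstract knight-move graph both programs explore -----
def inbP (N M : Int) (p : Int × Int) : Prop := 0 ≤ p.1 ∧ p.1 < N ∧ 0 ≤ p.2 ∧ p.2 < M

def cellAt (grid : List (List String)) (p : Int × Int) : String :=
  (grid.getD p.1.toNat []).getD p.2.toNat ""

def kstep (N M : Int) (grid : List (List String)) (u v : Int × Int) : Prop :=
  (∃ ab ∈ offsB, v = (u.1 + ab.1, u.2 + ab.2)) ∧ inbP N M v ∧ cellAt grid v ≠ "#"

def ReachP (N M : Int) (grid : List (List String)) (s p : Int × Int) : Prop :=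
  Relation.ReflTransGen (kstep N M grid) s p

lemma reach_inb {N M : Int} {grid : List (List String)} {s p : Int × Int}
    (hs : inbP N M s) (h : ReachP N M grid s p) : inbP N M p := by
  induction h with
  | refl => exact hs
  | tail _ hstep _ => exact hstep.2.1

-- ----- the visited matrix of A -----
def ShapeV (N M : Int) (vis : List (List Bool)) : Prop :=
  vis.length = N.toNat ∧ ∀ row ∈ vis, row.length = M.toNat

lemma shape_row {N M : Int} {vis : List (List Bool)} (h : ShapeV N M vis) {k : Nat}
    (hk : k < vis.length) : (vis.getD k []).length = M.toNat := by
  rw [List.getD_eq_getElem _ _ hk]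
  exact h.2 _ (List.getElem_mem _)

lemma shape_vset {N M : Int} {vis : List (List Bool)} (h : ShapeV N M vis) (p : Int × Int) :
    ShapeV N M (vset vis p) := by
  unfold vset
  by_cases hk : p.1.toNat < vis.length
  · refine ⟨by simpa using h.1, ?_⟩
    intro row hrow
    rcases List.mem_or_eq_of_mem_set hrow with h1 | h1
    · exact h.2 _ h1
    · subst h1; simpa using shape_row h hk
  · rw [List.set_eq_of_length_le (by omega)]
    exact h

lemma getD_set_true (row : List Bool) (c j : Nat) :
    ((row.set c true).getD j false = true) ↔ ((j = c ∧ c < row.length) ∨ row.getD j false = true) := by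
  by_cases hc : c < row.length
  · by_cases hj : j = c
    · subst hj
      rw [List.getD_eq_getElem _ _ (by simpa using hc)]
      simp [hc]
    · rw [List.getD, List.getElem?_set_ne (by omega), ← List.getD]
      simp [hj]
  · rw [List.set_eq_of_length_le (by omega)]
    simp; omega

lemma getD_set_row {A : Type} (vis : List (List A)) (k j : Nat) (row : List A) :
    (vis.set k row).getD j [] = if k = j ∧ k < vis.length then row else vis.getD j [] := by
  by_cases h1 : k < vis.length
  · by_cases h2 : k = j
    · subst h2
      rw [if_pos ⟨rfl, h1⟩, List.getD_eq_getElem _ _ (by simpa using h1)]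
      exact List.getElem_set_self (by simpa using h1)
    · rw [if_neg (by tauto)]
      simp [List.getD, List.getElem?_set_ne h2]
  · rw [List.set_eq_of_length_le (by omega), if_neg (by omega)]

lemma vget_vset (vis : List (List Bool)) (p q : Int × Int) :
    (vget (vset vis p) q = true) ↔
      ((q.1.toNat = p.1.toNat ∧ q.2.toNat = p.2.toNat ∧ p.1.toNat < vis.length ∧
        p.2.toNat < (vis.getD p.1.toNat []).length) ∨ vget vis q = true) := by
  unfold vget vset
  rw [getD_set_row]
  by_cases h1 : p.1.toNat = q.1.toNat ∧ p.1.toNat < vis.length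
  · rw [if_pos h1, getD_set_true, ← h1.1]
    constructor
    · rintro (⟨e2, hb⟩ | h2)
      · exact Or.inl ⟨rfl, e2, h1.2, hb⟩
      · exact Or.inr h2
    · rintro (⟨_, e2, _, hb⟩ | h2)
      · exact Or.inl ⟨e2, hb⟩
      · exact Or.inr h2
  · rw [if_neg h1]
    constructor
    · exact Or.inr
    · rintro (⟨e1, _, hb, _⟩ | h2)
      · exact absurd ⟨e1.symm, hb⟩ h1
      · exact h2

lemma vget_vset_mono {vis : List (List Bool)} {q : Int × Int} (p : Int × Int)
    (h : vget vis q = true) : vget (vset vis p) q = true :=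
  (vget_vset vis p q).2 (Or.inr h)

lemma vget_vset_self {vis : List (List Bool)} {p : Int × Int}
    (h1 : p.1.toNat < vis.length) (h2 : p.2.toNat < (vis.getD p.1.toNat []).length) :
    vget (vset vis p) p = true :=
  (vget_vset vis p p).2 (Or.inl ⟨rfl, rfl, h1, h2⟩)

-- ----- counting unvisited cells: the decreasing measure of A's loop -----
def unvV (vis : List (List Bool)) : Nat := (vis.map (fun row => row.count false)).sum

lemma count_false_set (row : List Bool) (c : Nat) (h : c < row.length)
    (hf : row.getD c false = false) : (row.set c true).count false + 1 = row.count false := by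
  rw [List.getD_eq_getElem _ _ h] at hf
  rw [List.set_eq_take_append_cons_drop, if_pos h]
  conv_rhs => rw [← List.take_append_drop c row, ← List.cons_getElem_drop_succ (h := h)]
  simp [List.count_append, hf]
  omega

lemma sum_map_set (l : List (List Bool)) (k : Nat) (row' : List Bool) (hk : k < l.length) :
    ((l.set k row').map (fun r => r.count false)).sum + (l.getD k []).count false
      = (l.map (fun r => r.count false)).sum + row'.count false := by
  induction l generalizing k with
  | nil => simp at hk
  | cons a l ih =>
    cases k with
    | zero => simp [List.getD]; omega
    | succ k =>
      have := ih k (by simpa using hk)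
      simp [List.getD] at this ⊢
      omega

lemma unv_vset {vis : List (List Bool)} {p : Int × Int}
    (h1 : p.1.toNat < vis.length) (h2 : p.2.toNat < (vis.getD p.1.toNat []).length)
    (h3 : vget vis p = false) : unvV (vset vis p) + 1 = unvV vis := by
  unfold unvV vset
  have hs := sum_map_set vis p.1.toNat ((vis.getD p.1.toNat []).set p.2.toNat true) h1
  have hc := count_false_set (vis.getD p.1.toNat []) p.2.toNat h2 h3
  omega

lemma sum_count_le (l : List (List Bool)) (m : Nat) (h : ∀ r ∈ l, r.length = m) :
    (l.map (fun r => r.count false)).sum ≤ l.length * m := by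
  induction l with
  | nil => simp
  | cons a l ih =>
    have h1 : a.count false ≤ m := by
      rw [← h a (List.mem_cons_self)]
      exact List.count_le_length
    have h2 := ih (fun r hr => h r (List.mem_cons_of_mem _ hr))
    simp [Nat.succ_mul]
    omega

lemma unv_le {N M : Int} {vis : List (List Bool)} (h : ShapeV N M vis) :
    unvV vis ≤ N.toNat * M.toNat := by
  have := sum_count_le vis M.toNat h.2
  rw [h.1] at this
  exact this

lemma eq_of_toNat_eq {p q : Int × Int} (hp1 : 0 ≤ p.1) (hp2 : 0 ≤ p.2) (hq1 : 0 ≤ q.1)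
    (hq2 : 0 ≤ q.2) (e1 : p.1.toNat = q.1.toNat) (e2 : p.2.toNat = q.2.toNat) : p = q := by
  apply Prod.ext <;> omega

-- ----- A's inner loop over the eight knight offsets -----
lemma dfsFold (N M : Int) (grid : List (List String)) (r c : Int) (L : List Int)
    (hL : ∀ i ∈ L, ((drA.getD i.toNat 0, dcA.getD i.toNat 0) : Int × Int) ∈ offsB) :
    ∀ (q0 : List (Int × Int)) (vis : List (List Bool)), ShapeV N M vis →
    ShapeV N M (L.foldl (dfsStep N M grid r c) (q0, vis)).2 ∧
    (∀ p, vget vis p = true → vget (L.foldl (dfsStep N M grid r c) (q0, vis)).2 p = true) ∧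
    (∀ p, inbP N M p → vget (L.foldl (dfsStep N M grid r c) (q0, vis)).2 p = true →
        vget vis p = true ∨ kstep N M grid (r, c) p) ∧
    (∀ p ∈ (L.foldl (dfsStep N M grid r c) (q0, vis)).1, p ∈ q0 ∨
        (kstep N M grid (r, c) p ∧ vget (L.foldl (dfsStep N M grid r c) (q0, vis)).2 p = true)) ∧
    (∀ p ∈ q0, p ∈ (L.foldl (dfsStep N M grid r c) (q0, vis)).1) ∧
    (∀ i ∈ L, ∀ v : Int × Int, v = (r + drA.getD i.toNat 0, c + dcA.getD i.toNat 0) →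
        inbP N M v → cellAt grid v ≠ "#" → vget (L.foldl (dfsStep N M grid r c) (q0, vis)).2 v = true) ∧
    (∀ p, inbP N M p → vget (L.foldl (dfsStep N M grid r c) (q0, vis)).2 p = true →
        vget vis p = false → p ∈ (L.foldl (dfsStep N M grid r c) (q0, vis)).1) ∧
    (9 * unvV (L.foldl (dfsStep N M grid r c) (q0, vis)).2 +
        (L.foldl (dfsStep N M grid r c) (q0, vis)).1.length ≤ 9 * unvV vis + q0.length) := by
  induction L with
  | nil =>
    intro q0 vis hsh
    simp only [List.foldl_nil]
    refine ⟨hsh, fun p h => h, fun p _ h => Or.inl h, fun p hp => Or.inl hp,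
      fun p hp => hp, fun i hi => absurd hi (List.not_mem_nil), fun p _ h1 h2 => ?_, le_refl _⟩
    rw [h1] at h2
    exact absurd h2 (by simp)
  | cons i L ih =>
    intro q0 vis hsh
    rw [List.foldl_cons]
    by_cases G : (0 ≤ r + drA.getD i.toNat 0 ∧ r + drA.getD i.toNat 0 < N ∧
        0 ≤ c + dcA.getD i.toNat 0 ∧ c + dcA.getD i.toNat 0 < M ∧
        (grid.getD (r + drA.getD i.toNat 0).toNat []).getD (c + dcA.getD i.toNat 0).toNat "" ≠ "#"
        ∧ vget vis (r + drA.getD i.toNat 0, c + dcA.getD i.toNat 0) = false)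
    · obtain ⟨g1, g2, g3, g4, g5, g6⟩ := G
      have hstep : dfsStep N M grid r c (q0, vis) i =
          (((r + drA.getD i.toNat 0, c + dcA.getD i.toNat 0)) :: q0,
            vset vis (r + drA.getD i.toNat 0, c + dcA.getD i.toNat 0)) := by
        unfold dfsStep
        rw [if_pos ⟨g1, g2, g3, g4, g5, g6⟩]
      have hinb : inbP N M ((r + drA.getD i.toNat 0, c + dcA.getD i.toNat 0) : Int × Int) :=
        ⟨g1, g2, g3, g4⟩
      have hcell : cellAt grid ((r + drA.getD i.toNat 0, c + dcA.getD i.toNat 0) : Int × Int) ≠ "#" := g5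
      have hks : kstep N M grid (r, c) (r + drA.getD i.toNat 0, c + dcA.getD i.toNat 0) :=
        ⟨⟨(drA.getD i.toNat 0, dcA.getD i.toNat 0), hL i (List.mem_cons_self), rfl⟩, hinb, hcell⟩
      have hb1 : (r + drA.getD i.toNat 0).toNat < vis.length := by rw [hsh.1]; omega
      have hb2 : (c + dcA.getD i.toNat 0).toNat <
          (vis.getD (r + drA.getD i.toNat 0).toNat []).length := by
        rw [shape_row hsh hb1]; omega
      have hself : vget (vset vis (r + drA.getD i.toNat 0, c + dcA.getD i.toNat 0))
          (r + drA.getD i.toNat 0, c + dcA.getD i.toNat 0) = true := vget_vset_self hb1 hb2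
      rw [hstep]
      obtain ⟨C1, C2, C3, C4, C5, C6, C7, C8⟩ :=
        ih (fun i' hi' => hL i' (List.mem_cons_of_mem _ hi'))
          ((r + drA.getD i.toNat 0, c + dcA.getD i.toNat 0) :: q0)
          (vset vis (r + drA.getD i.toNat 0, c + dcA.getD i.toNat 0))
          (shape_vset hsh _)
      refine ⟨C1, ?_, ?_, ?_, ?_, ?_, ?_, ?_⟩
      · intro p hp
        exact C2 p (vget_vset_mono _ hp)
      · intro p hip hp
        rcases C3 p hip hp with h1 | h1
        · rcases (vget_vset vis _ p).1 h1 with ⟨e1, e2, _, _⟩ | h2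
          · have hpe : p = (r + drA.getD i.toNat 0, c + dcA.getD i.toNat 0) :=
              eq_of_toNat_eq hip.1 hip.2.2.1 g1 g3 e1 e2
            rw [hpe]
            exact Or.inr hks
          · exact Or.inl h2
        · exact Or.inr h1
      · intro p hp
        rcases C4 p hp with h1 | h1
        · rcases List.mem_cons.1 h1 with h2 | h2
          · subst h2
            exact Or.inr ⟨hks, C2 _ hself⟩
          · exact Or.inl h2
        · exact Or.inr h1
      · intro p hp
        exact C5 p (List.mem_cons_of_mem _ hp)
      · intro i' hi' v hv hiv hcv
        rcases List.mem_cons.1 hi' with h1 | h1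
        · subst h1
          rw [hv]
          exact C2 _ hself
        · exact C6 i' h1 v hv hiv hcv
      · intro p hip hp hpf
        rcases C3 p hip hp with h1 | h1
        · rcases (vget_vset vis _ p).1 h1 with ⟨e1, e2, _, _⟩ | h2
          · have hpe : p = (r + drA.getD i.toNat 0, c + dcA.getD i.toNat 0) :=
              eq_of_toNat_eq hip.1 hip.2.2.1 g1 g3 e1 e2
            rw [hpe]
            exact C5 _ (List.mem_cons_self)
          · rw [h2] at hpf
            exact absurd hpf (by simp)
        · by_cases h2 : vget (vset vis (r + drA.getD i.toNat 0, c + dcA.getD i.toNat 0)) p = true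
          · rcases (vget_vset vis _ p).1 h2 with ⟨e1, e2, _, _⟩ | h3
            · have hpe : p = (r + drA.getD i.toNat 0, c + dcA.getD i.toNat 0) :=
                eq_of_toNat_eq hip.1 hip.2.2.1 g1 g3 e1 e2
              rw [hpe]
              exact C5 _ (List.mem_cons_self)
            · rw [h3] at hpf
              exact absurd hpf (by simp)
          · exact C7 p hip hp (by simpa using h2)
      · have hu := unv_vset hb1 hb2 g6
        simp only [List.length_cons] at C8
        omega
    · have hstep : dfsStep N M grid r c (q0, vis) i = (q0, vis) := by
        unfold dfsStep
        rw [if_neg G]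
      rw [hstep]
      obtain ⟨C1, C2, C3, C4, C5, C6, C7, C8⟩ := ih (fun i' hi' => hL i' (List.mem_cons_of_mem _ hi')) q0 vis hsh
      refine ⟨C1, C2, C3, C4, C5, ?_, C7, C8⟩
      intro i' hi' v hv hiv hcv
      rcases List.mem_cons.1 hi' with h1 | h1
      · subst h1
        have hvt : vget vis v = true := by
          by_contra hvf
          apply G
          rw [hv] at hiv hcv hvf
          exact ⟨hiv.1, hiv.2.1, hiv.2.2.1, hiv.2.2.2, hcv, by simpa using hvf⟩
        exact C2 v hvt
      · exact C6 i' h1 v hv hiv hcv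

lemma drdc_mem : ∀ i ∈ PySem.List.pyRange 0 8 1,
    ((drA.getD i.toNat 0, dcA.getD i.toNat 0) : Int × Int) ∈ offsB := by decide

lemma offs_surj : ∀ ab ∈ offsB, ∃ i ∈ PySem.List.pyRange 0 8 1,
    drA.getD i.toNat 0 = ab.1 ∧ dcA.getD i.toNat 0 = ab.2 := by decide

-- ----- A's outer loop -----
lemma dfsLoop_spec (N M : Int) (grid : List (List String)) (s : Int × Int) :
    ∀ (fuel : Nat) (q : List (Int × Int)) (vis : List (List Bool)),
    ShapeV N M vis →
    (∀ p ∈ q, inbP N M p ∧ vget vis p = true) →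
    (∀ p, inbP N M p → vget vis p = true → ReachP N M grid s p) →
    (∀ p, inbP N M p → vget vis p = true →
        p ∈ q ∨ ∀ v, kstep N M grid p v → vget vis v = true) →
    9 * unvV vis + q.length ≤ fuel →
    (∀ p, vget vis p = true → vget (dfsLoop N M grid fuel q vis) p = true) ∧
    (∀ p, inbP N M p → vget (dfsLoop N M grid fuel q vis) p = true → ReachP N M grid s p) ∧
    (∀ p, inbP N M p → vget (dfsLoop N M grid fuel q vis) p = true →
        ∀ v, kstep N M grid p v → vget (dfsLoop N M grid fuel q vis) v = true) := by
  intro fuel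
  induction fuel with
  | zero =>
    intro q vis hsh ha hb hc hm
    have hq : q = [] := by
      cases q with
      | nil => rfl
      | cons a l => simp at hm
    subst hq
    refine ⟨fun p h => h, hb, ?_⟩
    intro p hip hp v hkv
    rcases hc p hip hp with h1 | h1
    · exact absurd h1 (List.not_mem_nil)
    · exact h1 v hkv
  | succ fuel ih =>
    intro q vis hsh ha hb hc hm
    cases q with
    | nil =>
      refine ⟨fun p h => h, hb, ?_⟩
      intro p hip hp v hkv
      rcases hc p hip hp with h1 | h1
      · exact absurd h1 (List.not_mem_nil)
      · exact h1 v hkv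
    | cons hd tl =>
      obtain ⟨r, c⟩ := hd
      have hloop : dfsLoop N M grid (fuel + 1) ((r, c) :: tl) vis =
          dfsLoop N M grid fuel
            ((PySem.List.pyRange 0 8 1).foldl (dfsStep N M grid r c) (tl, vis)).1
            ((PySem.List.pyRange 0 8 1).foldl (dfsStep N M grid r c) (tl, vis)).2 := rfl
      obtain ⟨C1, C2, C3, C4, C5, C6, C7, C8⟩ := dfsFold N M grid r c _ drdc_mem tl vis hsh
      obtain ⟨hrc_inb, hrc_v⟩ := ha (r, c) (List.mem_cons_self)
      have hrc_reach : ReachP N M grid s (r, c) := hb _ hrc_inb hrc_v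
      have hclosed_rc : ∀ v, kstep N M grid (r, c) v →
          vget ((PySem.List.pyRange 0 8 1).foldl (dfsStep N M grid r c) (tl, vis)).2 v = true := by
        rintro v ⟨⟨ab, habm, hv⟩, hiv, hcv⟩
        obtain ⟨i, him, hdr, hdc⟩ := offs_surj ab habm
        exact C6 i him v (by rw [hv, hdr, hdc]) hiv hcv
      rw [hloop]
      obtain ⟨I1, I2, I3⟩ := ih
        ((PySem.List.pyRange 0 8 1).foldl (dfsStep N M grid r c) (tl, vis)).1
        ((PySem.List.pyRange 0 8 1).foldl (dfsStep N M grid r c) (tl, vis)).2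
        C1
        (by intro p hp
            rcases C4 p hp with h1 | h1
            · obtain ⟨h2, h3⟩ := ha p (List.mem_cons_of_mem _ h1)
              exact ⟨h2, C2 p h3⟩
            · exact ⟨h1.1.2.1, h1.2⟩)
        (by intro p hip hp
            rcases C3 p hip hp with h1 | h1
            · exact hb p hip h1
            · exact Relation.ReflTransGen.tail hrc_reach h1)
        (by intro p hip hp
            by_cases hv : vget vis p = true
            · rcases hc p hip hv with h1 | h1
              · rcases List.mem_cons.1 h1 with h2 | h2
                · subst h2
                  exact Or.inr hclosed_rc
                · exact Or.inl (C5 p h2)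
              · exact Or.inr (fun v hkv => C2 v (h1 v hkv))
            · exact Or.inl (C7 p hip hp (by simpa using hv)))
        (by simp only [List.length_cons] at hm
            omega)
      exact ⟨fun p hp => I1 p (C2 p hp), I2, I3⟩

lemma vget_replicate (n m : Nat) (p : Int × Int) :
    vget (List.replicate n (List.replicate m false)) p = false := by
  unfold vget
  simp only [List.getD, List.getElem?_replicate]
  split_ifs <;> simp

-- ----- the two H positions: A's scan and B's comprehension agree -----
def hstate (L : List (Int × Int)) : ((Int × Int) × (Int × Int)) × Int :=
  ((L.getD 0 (0, 0), L.getD 1 (0, 0)), (L.length : Int))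

lemma hfold_inner (grid : List (List String)) (i : Int) (Lj : List Int) :
    ∀ L0 : List (Int × Int),
    Lj.foldl (fun (st : ((Int × Int) × (Int × Int)) × Int) j =>
        if (grid.getD i.toNat []).getD j.toNat "" = "H" then
          (if st.2 = 0 then (((i, j), st.1.2), st.2 + 1)
           else if st.2 = 1 then ((st.1.1, (i, j)), st.2 + 1)
           else (st.1, st.2 + 1))
        else st) (hstate L0)
      = hstate (L0 ++ (Lj.filter (fun j => (grid.getD i.toNat []).getD j.toNat "" = "H")).map
          (fun j => (i, j))) := by
  induction Lj with
  | nil => intro L0; simp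
  | cons j Lj ihj =>
    intro L0
    rw [List.foldl_cons]
    by_cases hj : (grid.getD i.toNat []).getD j.toNat "" = "H"
    · rw [List.filter_cons_of_pos (by simpa using hj), List.map_cons,
        show L0 ++ (i, j) :: (Lj.filter _).map _ = (L0 ++ [(i, j)]) ++ (Lj.filter
          (fun j => (grid.getD i.toNat []).getD j.toNat "" = "H")).map (fun j => (i, j)) by simp]
      rw [← ihj (L0 ++ [(i, j)])]
      congr 1
      rw [if_pos hj]
      rcases L0 with _ | ⟨a, _ | ⟨b, L0⟩⟩
      · simp [hstate]
      · simp [hstate]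
      · simp only [hstate]
        rw [if_neg (by push_cast [List.length_cons]; omega),
          if_neg (by push_cast [List.length_cons]; omega)]
        simp
    · rw [List.filter_cons_of_neg (by simpa using hj), if_neg hj]
      exact ihj L0

lemma getHpos_eq (N M : Int) (grid : List (List String)) :
    getHpos N M grid = ((hlist N M grid).getD 0 (0, 0), (hlist N M grid).getD 1 (0, 0)) := by
  unfold getHpos hlist
  have houter : ∀ (Li : List Int) (L0 : List (Int × Int)),
      Li.foldl (fun st i =>
        (PySem.List.pyRange 0 M 1).foldl
          (fun (st : ((Int × Int) × (Int × Int)) × Int) j =>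
            if (grid.getD i.toNat []).getD j.toNat "" = "H" then
              (if st.2 = 0 then (((i, j), st.1.2), st.2 + 1)
               else if st.2 = 1 then ((st.1.1, (i, j)), st.2 + 1)
               else (st.1, st.2 + 1))
            else st) st) (hstate L0)
      = hstate (L0 ++ Li.flatMap (fun i =>
          ((PySem.List.pyRange 0 M 1).filter
            (fun j => (grid.getD i.toNat []).getD j.toNat "" = "H")).map (fun j => (i, j)))) := by
    intro Li
    induction Li with
    | nil => intro L0; simp
    | cons i Li ihi =>
      intro L0
      rw [List.foldl_cons, hfold_inner grid i _ L0, ihi, List.flatMap_cons, ← List.append_assoc]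
  have h0 : (((((0 : Int), (0 : Int)), ((0 : Int), (0 : Int))), (0 : Int)) :
      ((Int × Int) × (Int × Int)) × Int) = hstate [] := rfl
  rw [h0, houter (PySem.List.pyRange 0 N 1) []]
  simp [hstate]

lemma hlist_inb {N M : Int} {grid : List (List String)} {p : Int × Int}
    (hp : p ∈ hlist N M grid) : inbP N M p := by
  unfold hlist at hp
  simp only [List.mem_flatMap, List.mem_map, List.mem_filter,
    PySem.List.mem_pyRange_one] at hp
  obtain ⟨i, ⟨hi0, hiN⟩, j, ⟨⟨hj0, hjM⟩, _⟩, hpe⟩ := hp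
  rw [← hpe]
  exact ⟨hi0, hiN, hj0, hjM⟩

lemma hlist_cell {N M : Int} {grid : List (List String)} {p : Int × Int}
    (hp : p ∈ hlist N M grid) : cellAt grid p = "H" := by
  unfold hlist at hp
  simp only [List.mem_flatMap, List.mem_map, List.mem_filter,
    PySem.List.mem_pyRange_one] at hp
  obtain ⟨i, _, j, ⟨_, hc⟩, hpe⟩ := hp
  rw [← hpe]
  simpa [cellAt] using hc

lemma getD_hlist_inb {N M : Int} {grid : List (List String)} (h0N : 0 < N) (h0M : 0 < M)
    (k : Nat) : inbP N M ((hlist N M grid).getD k (0, 0)) := by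
  rcases Nat.lt_or_ge k (hlist N M grid).length with h | h
  · rw [List.getD_eq_getElem _ _ h]
    exact hlist_inb (List.getElem_mem _)
  · rw [List.getD_eq_default _ _ h]
    exact ⟨le_refl _, h0N, le_refl _, h0M⟩

-- ----- A computes reachability -----
lemma dfs_reach_iff (N M : Int) (grid : List (List String)) (s t : Int × Int)
    (hs : inbP N M s) (ht : inbP N M t) :
    vget (dfsLoop N M grid (9 * (N.toNat * M.toNat) + 2) [s]
      (vset (List.replicate N.toNat (List.replicate M.toNat false)) s)) t = true ↔
    ReachP N M grid s t := by
  set vis0 : List (List Bool) := List.replicate N.toNat (List.replicate M.toNat false) with hv0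
  have hsh0 : ShapeV N M vis0 := by
    constructor
    · simp [hv0]
    · intro row hrow
      rw [List.eq_of_mem_replicate hrow]
      simp
  have hsh1 : ShapeV N M (vset vis0 s) := shape_vset hsh0 s
  have hb1 : s.1.toNat < vis0.length := by rw [hsh0.1]; rcases hs with ⟨a, b, _, _⟩; omega
  have hb2 : s.2.toNat < (vis0.getD s.1.toNat []).length := by
    rw [shape_row hsh0 hb1]; rcases hs with ⟨_, _, a, b⟩; omega
  have hvs : vget (vset vis0 s) s = true := vget_vset_self hb1 hb2
  have honly : ∀ p, inbP N M p → vget (vset vis0 s) p = true → p = s := by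
    intro p hip hp
    rcases (vget_vset vis0 s p).1 hp with ⟨e1, e2, _, _⟩ | h1
    · exact eq_of_toNat_eq hip.1 hip.2.2.1 hs.1 hs.2.2.1 e1 e2
    · rw [hv0, vget_replicate] at h1
      exact absurd h1 (by simp)
  obtain ⟨hmono, hsound, hclosed⟩ := dfsLoop_spec N M grid s
    (9 * (N.toNat * M.toNat) + 2) [s] (vset vis0 s) hsh1
    (by intro p hp
        rw [List.mem_singleton.1 hp]
        exact ⟨hs, hvs⟩)
    (by intro p hip hp
        rw [honly p hip hp]
        exact Relation.ReflTransGen.refl)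
    (by intro p hip hp
        exact Or.inl (by rw [honly p hip hp]; exact List.mem_cons_self))
    (by have := unv_le hsh1
        simp only [List.length_cons, List.length_nil]
        omega)
  constructor
  · exact hsound t ht
  · intro hr
    induction hr with
    | refl => exact hmono s hvs
    | @tail b v hR hkv ihr =>
      exact hclosed b (reach_inb hs hR) (ihr (reach_inb hs hR)) v hkv

lemma solve_iff (N M : Int) (grid : List (List String)) (h0N : 0 < N) (h0M : 0 < M) :
    solve N M grid = true ↔ ReachP N M grid ((hlist N M grid).getD 0 (0, 0))
      ((hlist N M grid).getD 1 (0, 0)) := by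
  have hsi : inbP N M ((hlist N M grid).getD 0 (0, 0)) := getD_hlist_inb h0N h0M 0
  have ht : inbP N M ((hlist N M grid).getD 1 (0, 0)) := getD_hlist_inb h0N h0M 1
  unfold solve
  rw [getHpos_eq]
  exact dfs_reach_iff N M grid _ _ hsi ht

-- ----- cell indices r*M+c -----
def idxN (M : Int) (p : Int × Int) : Nat := (p.1 * M + p.2).toNat

lemma idx_bounds {N M : Int} {p : Int × Int} (hp : inbP N M p) :
    0 ≤ p.1 * M + p.2 ∧ p.1 * M + p.2 < N * M := by
  obtain ⟨h1, h2, h3, h4⟩ := hp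
  have hM : 0 < M := by omega
  constructor
  · have := mul_nonneg h1 (le_of_lt hM)
    omega
  · have ha : p.1 * M + p.2 < (p.1 + 1) * M := by
      rw [add_mul, one_mul]
      omega
    have hb : (p.1 + 1) * M ≤ N * M :=
      mul_le_mul_of_nonneg_right (by omega) (le_of_lt hM)
    omega

lemma idx_inj {N M : Int} {p q : Int × Int} (hp : inbP N M p) (hq : inbP N M q)
    (h : p.1 * M + p.2 = q.1 * M + q.2) : p = q := by
  obtain ⟨_, _, hp3, hp4⟩ := hp
  obtain ⟨_, _, hq3, hq4⟩ := hq
  have hM : 0 < M := by omega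
  have h1 : p.1 = q.1 := by
    by_contra hne
    rcases lt_or_gt_of_ne hne with hlt | hlt
    · have : (p.1 + 1) * M ≤ q.1 * M := mul_le_mul_of_nonneg_right (by omega) (le_of_lt hM)
      rw [add_mul, one_mul] at this
      omega
    · have : (q.1 + 1) * M ≤ p.1 * M := mul_le_mul_of_nonneg_right (by omega) (le_of_lt hM)
      rw [add_mul, one_mul] at this
      omega
  apply Prod.ext h1
  rw [h1] at h
  omega

lemma idxN_lt {N M : Int} {p : Int × Int} (hp : inbP N M p) : idxN M p < (N * M).toNat := by
  have := idx_bounds hp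
  unfold idxN
  omega

lemma idxN_inj {N M : Int} {p q : Int × Int} (hp : inbP N M p) (hq : inbP N M q)
    (h : idxN M p = idxN M q) : p = q := by
  have h1 := (idx_bounds hp).1
  have h2 := (idx_bounds hq).1
  exact idx_inj hp hq (by unfold idxN at h; omega)

-- ----- union-find basics -----
def rootD (P : List Nat) (x : Nat) : Nat := ufFind P (x + 1) x

def DecP (P : List Nat) : Prop := ∀ x, P.getD x x ≤ x

lemma ufFind_succ (P : List Nat) (f x : Nat) :
    ufFind P (f + 1) x = if P.getD x x = x then x else ufFind P f (P.getD x x) := rfl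

lemma getD_set_nat (P : List Nat) (k v x : Nat) :
    (P.set k v).getD x x = if k = x ∧ k < P.length then v else P.getD x x := by
  by_cases h1 : k < P.length
  · by_cases h2 : k = x
    · subst h2
      rw [if_pos ⟨rfl, h1⟩, List.getD_eq_getElem _ _ (by simpa using h1)]
      exact List.getElem_set_self (by simpa using h1)
    · rw [if_neg (by tauto)]
      simp [List.getD, List.getElem?_set_ne h2]
  · rw [List.set_eq_of_length_le (by omega), if_neg (by omega)]

lemma decP_set {P : List Nat} (hP : DecP P) {k v : Nat} (hv : v ≤ k) : DecP (P.set k v) := by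
  intro x
  rw [getD_set_nat]
  split_ifs with h
  · omega
  · exact hP x

lemma rootD_aux (P : List Nat) (hP : DecP P) :
    ∀ x, ∀ fuel, x < fuel → ufFind P fuel x = rootD P x := by
  intro x
  induction x using Nat.strong_induction_on with
  | _ x ih =>
    intro fuel hx
    obtain ⟨f, rfl⟩ : ∃ f, fuel = f + 1 := ⟨fuel - 1, by omega⟩
    by_cases h : P.getD x x = x
    · unfold rootD
      rw [ufFind_succ, ufFind_succ, if_pos h, if_pos h]
    · have hlt : P.getD x x < x := lt_of_le_of_ne (hP x) h
      have h1 : ufFind P (f + 1) x = ufFind P f (P.getD x x) := by rw [ufFind_succ, if_neg h]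
      have h2 : rootD P x = ufFind P x (P.getD x x) := by unfold rootD; rw [ufFind_succ, if_neg h]
      rw [h1, h2, ih _ hlt f (by omega), ih _ hlt x hlt]

lemma rootD_root (P : List Nat) {r : Nat} (h : P.getD r r = r) : rootD P r = r := by
  unfold rootD
  rw [ufFind_succ, if_pos h]

lemma rootD_le (P : List Nat) (hP : DecP P) : ∀ x, rootD P x ≤ x := by
  intro x
  induction x using Nat.strong_induction_on with
  | _ x ih =>
    by_cases h : P.getD x x = x
    · rw [rootD_root P h]
    · have hlt : P.getD x x < x := lt_of_le_of_ne (hP x) h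
      have h2 : rootD P x = ufFind P x (P.getD x x) := by unfold rootD; rw [ufFind_succ, if_neg h]
      rw [h2, rootD_aux P hP _ x hlt]
      exact le_trans (ih _ hlt) (le_of_lt hlt)

lemma rootD_fix (P : List Nat) (hP : DecP P) :
    ∀ x, P.getD (rootD P x) (rootD P x) = rootD P x := by
  intro x
  induction x using Nat.strong_induction_on with
  | _ x ih =>
    by_cases h : P.getD x x = x
    · rw [rootD_root P h, h]
    · have hlt : P.getD x x < x := lt_of_le_of_ne (hP x) h
      have h2 : rootD P x = ufFind P x (P.getD x x) := by unfold rootD; rw [ufFind_succ, if_neg h]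
      rw [h2, rootD_aux P hP _ x hlt]
      exact ih _ hlt

lemma rootD_set (P : List Nat) (hP : DecP P) {r r' : Nat} (hr : P.getD r r = r)
    (hrlen : r < P.length) (hlt : r' < r) (hr' : P.getD r' r' = r') :
    ∀ x, rootD (P.set r r') x = if rootD P x = r then r' else rootD P x := by
  have hP' : DecP (P.set r r') := decP_set hP (le_of_lt hlt)
  have hne : r' ≠ r := Nat.ne_of_lt hlt
  intro x
  induction x using Nat.strong_induction_on with
  | _ x ih =>
    by_cases hx : x = r
    · subst hx
      have e1 : (P.set x r').getD x x = r' := by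
        rw [getD_set_nat, if_pos ⟨rfl, hrlen⟩]
      have l1 : rootD (P.set x r') x = ufFind (P.set x r') x r' := by
        unfold rootD
        rw [ufFind_succ, e1, if_neg hne]
      have e2 : (P.set x r').getD r' r' = r' := by
        rw [getD_set_nat, if_neg (by omega)]
        exact hr'
      rw [l1, rootD_aux _ hP' r' x hlt, rootD_root _ e2, rootD_root _ hr, if_pos rfl]
    · have e : (P.set r r').getD x x = P.getD x x := by
        rw [getD_set_nat, if_neg (by tauto)]
      by_cases hfix : P.getD x x = x
      · have l1 : rootD (P.set r r') x = x := by
          apply rootD_root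
          rw [e]
          exact hfix
        have l2 : rootD P x = x := rootD_root P hfix
        rw [l1, l2, if_neg hx]
      · have hlt2 : P.getD x x < x := lt_of_le_of_ne (hP x) hfix
        have l1 : rootD (P.set r r') x = ufFind (P.set r r') x (P.getD x x) := by
          unfold rootD
          rw [ufFind_succ, e, if_neg hfix]
        have l2 : rootD P x = ufFind P x (P.getD x x) := by
          unfold rootD
          rw [ufFind_succ, if_neg hfix]
        rw [l1, l2, rootD_aux _ hP' _ x hlt2, rootD_aux _ hP _ x hlt2, ih _ hlt2]

-- ----- passable knight edges and their equivalence closure -----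
def edgeR (N M : Int) (grid : List (List String)) (a b : Nat) : Prop :=
  ∃ u v : Int × Int, inbP N M u ∧ inbP N M v ∧ cellAt grid u ≠ "#" ∧ cellAt grid v ≠ "#" ∧
    (∃ ab ∈ offsB, v = (u.1 + ab.1, u.2 + ab.2)) ∧ a = idxN M u ∧ b = idxN M v

def Conn (N M : Int) (grid : List (List String)) : Nat → Nat → Prop :=
  Relation.EqvGen (edgeR N M grid)

def UFInv (N M : Int) (grid : List (List String)) (P : List Nat) : Prop :=
  P.length = (N * M).toNat ∧ DecP P ∧ ∀ x, Conn N M grid x (P.getD x x)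

lemma conn_rootD {N M : Int} {grid : List (List String)} {P : List Nat}
    (hInv : UFInv N M grid P) : ∀ x, Conn N M grid x (rootD P x) := by
  obtain ⟨_, hP, hC⟩ := hInv
  intro x
  induction x using Nat.strong_induction_on with
  | _ x ih =>
    by_cases h : P.getD x x = x
    · rw [rootD_root _ h]
      exact Relation.EqvGen.refl x
    · have hlt : P.getD x x < x := lt_of_le_of_ne (hP x) h
      have h2 : rootD P x = ufFind P x (P.getD x x) := by unfold rootD; rw [ufFind_succ, if_neg h]
      rw [h2, rootD_aux _ hP _ x hlt]
      exact Relation.EqvGen.trans _ _ _ (hC x) (ih _ hlt)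

-- ----- one union step -----
lemma unite_props (N M : Int) (grid : List (List String)) (i j : Int) (P : List Nat)
    (ab : Int × Int) (hab : ab ∈ offsB)
    (hi0 : 0 ≤ i) (hiN : i < N) (hj0 : 0 ≤ j) (hjM : j < M)
    (hij : cellAt grid (i, j) ≠ "#") (hInv : UFInv N M grid P) :
    UFInv N M grid (ufUnite N M grid i j P ab) ∧
    (∀ a b : Nat, rootD P a = rootD P b →
      rootD (ufUnite N M grid i j P ab) a = rootD (ufUnite N M grid i j P ab) b) := by
  obtain ⟨hlen, hP, hC⟩ := hInv
  unfold ufUnite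
  by_cases G : (0 ≤ i + ab.1 ∧ i + ab.1 < N ∧ 0 ≤ j + ab.2 ∧ j + ab.2 < M ∧
      (grid.getD (i + ab.1).toNat []).getD (j + ab.2).toNat "" ≠ "#")
  · rw [if_pos G]
    obtain ⟨g1, g2, g3, g4, g5⟩ := G
    have hu : inbP N M ((i, j) : Int × Int) := ⟨hi0, hiN, hj0, hjM⟩
    have hv : inbP N M ((i + ab.1, j + ab.2) : Int × Int) := ⟨g1, g2, g3, g4⟩
    have hx : (i * M + j).toNat < (N * M).toNat := idxN_lt hu
    have hy : ((i + ab.1) * M + (j + ab.2)).toNat < (N * M).toNat := idxN_lt hv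
    have hra : ufFind P ((i * M + j).toNat + 1) (i * M + j).toNat = rootD P (i * M + j).toNat := rfl
    have hrb : ufFind P (((i + ab.1) * M + (j + ab.2)).toNat + 1)
        ((i + ab.1) * M + (j + ab.2)).toNat = rootD P ((i + ab.1) * M + (j + ab.2)).toNat := rfl
    simp only [hra, hrb]
    set ra := rootD P (i * M + j).toNat with hradef
    set rb := rootD P ((i + ab.1) * M + (j + ab.2)).toNat with hrbdef
    by_cases hne : ra ≠ rb
    · rw [if_pos hne]
      have hralt : ra < (N * M).toNat := lt_of_le_of_lt (rootD_le P hP _) hx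
      have hrblt : rb < (N * M).toNat := lt_of_le_of_lt (rootD_le P hP _) hy
      have hrafix : P.getD ra ra = ra := rootD_fix P hP _
      have hrbfix : P.getD rb rb = rb := rootD_fix P hP _
      have hmaxfix : P.getD (max ra rb) (max ra rb) = max ra rb := by
        rcases Nat.le_total ra rb with h | h
        · rwa [Nat.max_eq_right h]
        · rwa [Nat.max_eq_left h]
      have hminfix : P.getD (min ra rb) (min ra rb) = min ra rb := by
        rcases Nat.le_total ra rb with h | h
        · rwa [Nat.min_eq_left h]
        · rwa [Nat.min_eq_right h]
      have hmaxlen : max ra rb < P.length := by rw [hlen]; omega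
      have hminmax : min ra rb < max ra rb := by omega
      have hconn_edge : Conn N M grid (idxN M ((i, j) : Int × Int))
          (idxN M ((i + ab.1, j + ab.2) : Int × Int)) :=
        Relation.EqvGen.rel _ _ ⟨(i, j), (i + ab.1, j + ab.2), hu, hv, hij, g5,
          ⟨ab, hab, rfl⟩, rfl, rfl⟩
      have hconn_ra_rb : Conn N M grid ra rb := by
        have c1 : Conn N M grid (idxN M ((i, j) : Int × Int)) ra := conn_rootD ⟨hlen, hP, hC⟩ _
        have c2 : Conn N M grid (idxN M ((i + ab.1, j + ab.2) : Int × Int)) rb :=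
          conn_rootD ⟨hlen, hP, hC⟩ _
        exact Relation.EqvGen.trans _ _ _
          (Relation.EqvGen.trans _ _ _ (Relation.EqvGen.symm _ _ c1) hconn_edge) c2
      have hconn_max_min : Conn N M grid (max ra rb) (min ra rb) := by
        rcases Nat.le_total ra rb with h | h
        · rw [Nat.max_eq_right h, Nat.min_eq_left h]
          exact Relation.EqvGen.symm _ _ hconn_ra_rb
        · rw [Nat.max_eq_left h, Nat.min_eq_right h]
          exact hconn_ra_rb
      have hrs := rootD_set P hP hmaxfix hmaxlen hminmax hminfix
      refine ⟨⟨by simpa using hlen, decP_set hP (le_of_lt hminmax), ?_⟩, ?_⟩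
      · intro z
        rw [getD_set_nat]
        split_ifs with h
        · rw [← h.1]
          exact hconn_max_min
        · exact hC z
      · intro a b h
        rw [hrs a, hrs b, h]
    · rw [if_neg hne]
      exact ⟨⟨hlen, hP, hC⟩, fun a b h => h⟩
  · rw [if_neg G]
    exact ⟨⟨hlen, hP, hC⟩, fun a b h => h⟩

lemma unite_estab (N M : Int) (grid : List (List String)) (i j : Int) (P : List Nat)
    (ab : Int × Int)
    (hi0 : 0 ≤ i) (hiN : i < N) (hj0 : 0 ≤ j) (hjM : j < M)
    (hg : 0 ≤ i + ab.1 ∧ i + ab.1 < N ∧ 0 ≤ j + ab.2 ∧ j + ab.2 < M ∧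
      (grid.getD (i + ab.1).toNat []).getD (j + ab.2).toNat "" ≠ "#")
    (hInv : UFInv N M grid P) :
    rootD (ufUnite N M grid i j P ab) ((i * M + j).toNat)
      = rootD (ufUnite N M grid i j P ab) (((i + ab.1) * M + (j + ab.2)).toNat) := by
  obtain ⟨hlen, hP, hC⟩ := hInv
  unfold ufUnite
  rw [if_pos hg]
  obtain ⟨g1, g2, g3, g4, g5⟩ := hg
  have hu : inbP N M ((i, j) : Int × Int) := ⟨hi0, hiN, hj0, hjM⟩
  have hv : inbP N M ((i + ab.1, j + ab.2) : Int × Int) := ⟨g1, g2, g3, g4⟩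
  have hx : (i * M + j).toNat < (N * M).toNat := idxN_lt hu
  have hy : ((i + ab.1) * M + (j + ab.2)).toNat < (N * M).toNat := idxN_lt hv
  have hra : ufFind P ((i * M + j).toNat + 1) (i * M + j).toNat = rootD P (i * M + j).toNat := rfl
  have hrb : ufFind P (((i + ab.1) * M + (j + ab.2)).toNat + 1)
      ((i + ab.1) * M + (j + ab.2)).toNat = rootD P ((i + ab.1) * M + (j + ab.2)).toNat := rfl
  simp only [hra, hrb]
  set ra := rootD P (i * M + j).toNat with hradef
  set rb := rootD P ((i + ab.1) * M + (j + ab.2)).toNat with hrbdef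
  by_cases hne : ra ≠ rb
  · rw [if_pos hne]
    have hrafix : P.getD ra ra = ra := rootD_fix P hP _
    have hrbfix : P.getD rb rb = rb := rootD_fix P hP _
    have hmaxfix : P.getD (max ra rb) (max ra rb) = max ra rb := by
      rcases Nat.le_total ra rb with h | h
      · rwa [Nat.max_eq_right h]
      · rwa [Nat.max_eq_left h]
    have hminfix : P.getD (min ra rb) (min ra rb) = min ra rb := by
      rcases Nat.le_total ra rb with h | h
      · rwa [Nat.min_eq_left h]
      · rwa [Nat.min_eq_right h]
    have hmaxlen : max ra rb < P.length := by
      have hralt : ra < (N * M).toNat := lt_of_le_of_lt (rootD_le P hP _) hx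
      have hrblt : rb < (N * M).toNat := lt_of_le_of_lt (rootD_le P hP _) hy
      rw [hlen]; omega
    have hminmax : min ra rb < max ra rb := by omega
    have hrs := rootD_set P hP hmaxfix hmaxlen hminmax hminfix
    rw [hrs, hrs, ← hradef, ← hrbdef]
    rcases Nat.le_total ra rb with h | h
    · rw [Nat.max_eq_right h, Nat.min_eq_left h]
      have hrab : ra ≠ rb := hne
      rw [if_neg (by omega), if_pos rfl]
    · rw [Nat.max_eq_left h, Nat.min_eq_right h]
      have hrab : ra ≠ rb := hne
      rw [if_pos rfl, if_neg (by omega)]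
  · rw [if_neg hne]
    simpa using (not_ne_iff.mp hne)

-- ----- generic fold machinery -----
lemma foldl_inv {α σ : Type} (g : σ → α → σ) (Inv : σ → Prop) :
    ∀ (L : List α) (s : σ), (∀ t a, a ∈ L → Inv t → Inv (g t a)) → Inv s → Inv (L.foldl g s) := by
  intro L
  induction L with
  | nil => intro s _ hs; simpa using hs
  | cons a L ih =>
    intro s hstep hs
    rw [List.foldl_cons]
    exact ih (g s a) (fun t a' ha' ht => hstep t a' (List.mem_cons_of_mem _ ha') ht)
      (hstep s a List.mem_cons_self hs)

lemma foldl_estab {α σ : Type} (g : σ → α → σ) (Inv Q : σ → Prop) :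
    ∀ (L : List α) (s : σ) (ℓ : α), ℓ ∈ L →
    (∀ t a, a ∈ L → Inv t → Inv (g t a)) →
    (∀ t a, a ∈ L → Inv t → Q t → Q (g t a)) →
    (∀ t, Inv t → Q (g t ℓ)) → Inv s → Q (L.foldl g s) := by
  intro L
  induction L with
  | nil => intro s ℓ hm; exact absurd hm (List.not_mem_nil)
  | cons a L ih =>
    intro s ℓ hm hInv hQ hEst hs
    rw [List.foldl_cons]
    rcases List.mem_cons.1 hm with rfl | hm'
    · have h1 : Inv (g s ℓ) := hInv s ℓ List.mem_cons_self hs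
      have h2 : Q (g s ℓ) := hEst s hs
      have := foldl_inv g (fun t => Inv t ∧ Q t) L (g s ℓ)
        (fun t a' ha' ht => ⟨hInv t a' (List.mem_cons_of_mem _ ha') ht.1,
          hQ t a' (List.mem_cons_of_mem _ ha') ht.1 ht.2⟩) ⟨h1, h2⟩
      exact this.2
    · exact ih (g s a) ℓ hm' (fun t a' ha' ht => hInv t a' (List.mem_cons_of_mem _ ha') ht)
        (fun t a' ha' ht hq => hQ t a' (List.mem_cons_of_mem _ ha') ht hq)
        hEst (hInv s a List.mem_cons_self hs)

lemma foldl_id {α σ : Type} : ∀ (L : List α) (s : σ), L.foldl (fun s _ => s) s = s := by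
  intro L
  induction L with
  | nil => intro s; rfl
  | cons a L ih => intro s; rw [List.foldl_cons]; exact ih s

lemma foldl_flatMap {α β σ : Type} (f : α → List β) (g : σ → β → σ) :
    ∀ (L : List α) (s : σ), ((L.flatMap f).foldl g s) = L.foldl (fun s x => (f x).foldl g s) s := by
  intro L
  induction L with
  | nil => intro s; rfl
  | cons a L ih =>
    intro s
    rw [List.flatMap_cons, List.foldl_append, List.foldl_cons, ih]

-- ----- the flattened union loop -----
def gStep (N M : Int) (grid : List (List String)) (P : List Nat)
    (t : Int × Int × Int × Int) : List Nat :=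
  if (grid.getD t.1.toNat []).getD t.2.1.toNat "" = "#" then P
  else ufUnite N M grid t.1 t.2.1 P t.2.2

def tripleList (N M : Int) : List (Int × Int × Int × Int) :=
  (PySem.List.pyRange 0 N 1).flatMap (fun i =>
    (PySem.List.pyRange 0 M 1).flatMap (fun j => offsB.map (fun ab => (i, j, ab))))

lemma mem_tripleList {N M : Int} {t : Int × Int × Int × Int} :
    t ∈ tripleList N M ↔ (0 ≤ t.1 ∧ t.1 < N) ∧ (0 ≤ t.2.1 ∧ t.2.1 < M) ∧ t.2.2 ∈ offsB := by
  obtain ⟨i, j, ab⟩ := t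
  constructor
  · intro h
    simp only [tripleList, List.mem_flatMap, List.mem_map, PySem.List.mem_pyRange_one] at h
    obtain ⟨i', hi', j', hj', ab', hab', heq⟩ := h
    obtain ⟨rfl, rfl, rfl⟩ : i' = i ∧ j' = j ∧ ab' = ab := by
      simpa [Prod.ext_iff] using heq
    exact ⟨hi', hj', hab'⟩
  · rintro ⟨hi, hj, hab⟩
    simp only [tripleList, List.mem_flatMap, List.mem_map, PySem.List.mem_pyRange_one]
    exact ⟨i, hi, j, hj, ab, hab, rfl⟩

lemma buildUF_eq (N M : Int) (grid : List (List String)) :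
    buildUF N M grid = (tripleList N M).foldl (gStep N M grid) (List.range (N * M).toNat) := by
  unfold buildUF tripleList
  rw [foldl_flatMap]
  have hfun : (fun (par : List Nat) (i : Int) =>
      (PySem.List.pyRange 0 M 1).foldl (fun par j =>
        if (grid.getD i.toNat []).getD j.toNat "" = "#" then par
        else offsB.foldl (ufUnite N M grid i j) par) par)
    = (fun (s : List Nat) (i : Int) =>
      (((PySem.List.pyRange 0 M 1).flatMap (fun j => offsB.map (fun ab => (i, j, ab)))).foldl
        (gStep N M grid) s)) := by
    funext par i
    rw [foldl_flatMap]
    have hin : (fun (par : List Nat) (j : Int) =>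
        if (grid.getD i.toNat []).getD j.toNat "" = "#" then par
        else offsB.foldl (ufUnite N M grid i j) par)
      = (fun (s : List Nat) (j : Int) =>
        ((offsB.map (fun ab => (i, j, ab))).foldl (gStep N M grid) s)) := by
      funext par j
      rw [List.foldl_map]
      by_cases h : (grid.getD i.toNat []).getD j.toNat "" = "#"
      · rw [if_pos h]
        have : (fun (s : List Nat) (ab : Int × Int) => gStep N M grid s (i, j, ab))
            = (fun (s : List Nat) (_ : Int × Int) => s) := by
          funext s ab
          show (if (grid.getD i.toNat []).getD j.toNat "" = "#" then s
                else ufUnite N M grid i j s ab) = s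
          rw [if_pos h]
        rw [this, foldl_id]
      · rw [if_neg h]
        congr 1
        funext s ab
        show ufUnite N M grid i j s ab
            = (if (grid.getD i.toNat []).getD j.toNat "" = "#" then s
               else ufUnite N M grid i j s ab)
        rw [if_neg h]
    rw [hin]
  rw [hfun]

lemma range_getD (n x : Nat) : (List.range n).getD x x = x := by
  by_cases h : x < n
  · rw [List.getD_eq_getElem _ _ (by simpa using h)]
    simp
  · rw [List.getD_eq_default _ _ (by simpa using h)]

lemma init_inv (N M : Int) (grid : List (List String)) :
    UFInv N M grid (List.range (N * M).toNat) := by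
  refine ⟨by simp, fun x => le_of_eq (range_getD _ x), fun x => ?_⟩
  rw [range_getD]
  exact Relation.EqvGen.refl x

lemma gStep_inv (N M : Int) (grid : List (List String)) (P : List Nat)
    (t : Int × Int × Int × Int) (ht : t ∈ tripleList N M) (hInv : UFInv N M grid P) :
    UFInv N M grid (gStep N M grid P t) := by
  obtain ⟨⟨h1, h2⟩, ⟨h3, h4⟩, h5⟩ := mem_tripleList.1 ht
  unfold gStep
  by_cases h : (grid.getD t.1.toNat []).getD t.2.1.toNat "" = "#"
  · rwa [if_pos h]
  · rw [if_neg h]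
    exact (unite_props N M grid t.1 t.2.1 P t.2.2 h5 h1 h2 h3 h4 h hInv).1

lemma gStep_pres (N M : Int) (grid : List (List String)) (P : List Nat)
    (t : Int × Int × Int × Int) (ht : t ∈ tripleList N M) (hInv : UFInv N M grid P)
    {a b : Nat} (h : rootD P a = rootD P b) :
    rootD (gStep N M grid P t) a = rootD (gStep N M grid P t) b := by
  obtain ⟨⟨h1, h2⟩, ⟨h3, h4⟩, h5⟩ := mem_tripleList.1 ht
  unfold gStep
  by_cases hc : (grid.getD t.1.toNat []).getD t.2.1.toNat "" = "#"
  · rwa [if_pos hc]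
  · rw [if_neg hc]
    exact (unite_props N M grid t.1 t.2.1 P t.2.2 h5 h1 h2 h3 h4 hc hInv).2 a b h

lemma buildUF_inv (N M : Int) (grid : List (List String)) :
    UFInv N M grid (buildUF N M grid) := by
  rw [buildUF_eq]
  exact foldl_inv (gStep N M grid) (UFInv N M grid) (tripleList N M)
    (List.range (N * M).toNat) (fun t a ha hInv => gStep_inv N M grid t a ha hInv)
    (init_inv N M grid)

lemma buildUF_edge (N M : Int) (grid : List (List String)) {a b : Nat}
    (h : edgeR N M grid a b) :
    rootD (buildUF N M grid) a = rootD (buildUF N M grid) b := by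
  obtain ⟨u, v, hu, hv, hpu, hpv, ⟨ab, habm, hveq⟩, rfl, rfl⟩ := h
  rw [buildUF_eq]
  refine foldl_estab (gStep N M grid) (UFInv N M grid)
    (fun P => rootD P (idxN M u) = rootD P (idxN M v))
    (tripleList N M) (List.range (N * M).toNat) (u.1, u.2, ab) ?_
    (fun t a ha hInv => gStep_inv N M grid t a ha hInv)
    (fun t a ha hInv hq => gStep_pres N M grid t a ha hInv hq)
    ?_ (init_inv N M grid)
  · exact mem_tripleList.2 ⟨⟨hu.1, hu.2.1⟩, ⟨hu.2.2.1, hu.2.2.2⟩, habm⟩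
  · intro P hInv
    have hcu : (grid.getD u.1.toNat []).getD u.2.toNat "" ≠ "#" := hpu
    have hstep : gStep N M grid P (u.1, u.2, ab) = ufUnite N M grid u.1 u.2 P ab := by
      unfold gStep
      rw [if_neg hcu]
    rw [hstep]
    have hg : 0 ≤ u.1 + ab.1 ∧ u.1 + ab.1 < N ∧ 0 ≤ u.2 + ab.2 ∧ u.2 + ab.2 < M ∧
        (grid.getD (u.1 + ab.1).toNat []).getD (u.2 + ab.2).toNat "" ≠ "#" := by
      subst hveq
      exact ⟨hv.1, hv.2.1, hv.2.2.1, hv.2.2.2, hpv⟩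
    have := unite_estab N M grid u.1 u.2 P ab hu.1 hu.2.1 hu.2.2.1 hu.2.2.2 hg hInv
    have hidxu : (u.1 * M + u.2).toNat = idxN M u := rfl
    have hidxv : ((u.1 + ab.1) * M + (u.2 + ab.2)).toNat = idxN M v := by
      rw [hveq]; rfl
    rwa [hidxu, hidxv] at this

lemma root_eq_iff_conn (N M : Int) (grid : List (List String)) (a b : Nat) :
    rootD (buildUF N M grid) a = rootD (buildUF N M grid) b ↔ Conn N M grid a b := by
  constructor
  · intro h
    have c1 : Conn N M grid a (rootD (buildUF N M grid) a) :=
      conn_rootD (buildUF_inv N M grid) a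
    have c2 : Conn N M grid b (rootD (buildUF N M grid) b) :=
      conn_rootD (buildUF_inv N M grid) b
    rw [h] at c1
    exact Relation.EqvGen.trans _ _ _ c1 (Relation.EqvGen.symm _ _ c2)
  · intro h
    induction h with
    | rel x y hxy => exact buildUF_edge N M grid hxy
    | refl x => rfl
    | symm x y _ ih => exact ih.symm
    | trans x y z _ _ ih1 ih2 => exact ih1.trans ih2

-- ----- equivalence closure vs reachability -----
lemma reach_pass {N M : Int} {grid : List (List String)} {s p : Int × Int}
    (h : ReachP N M grid s p) : p = s ∨ (inbP N M p ∧ cellAt grid p ≠ "#") := by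
  induction h with
  | refl => exact Or.inl rfl
  | tail _ hstep _ => exact Or.inr ⟨hstep.2.1, hstep.2.2⟩

lemma offs_neg : ∀ ab ∈ offsB, ((-ab.1, -ab.2) : Int × Int) ∈ offsB := by decide

lemma kstep_symm {N M : Int} {grid : List (List String)} {u v : Int × Int}
    (hu : inbP N M u) (hpu : cellAt grid u ≠ "#") (h : kstep N M grid u v) :
    kstep N M grid v u := by
  obtain ⟨⟨ab, habm, hveq⟩, _, _⟩ := h
  refine ⟨⟨(-ab.1, -ab.2), offs_neg ab habm, ?_⟩, hu, hpu⟩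
  rw [hveq]
  apply Prod.ext <;> simp

lemma reach_symm {N M : Int} {grid : List (List String)} {s p : Int × Int}
    (hs : inbP N M s) (hps : cellAt grid s ≠ "#") (h : ReachP N M grid s p) :
    ReachP N M grid p s := by
  induction h with
  | refl => exact Relation.ReflTransGen.refl
  | @tail b v hR hstep ih =>
    have hb : inbP N M b ∧ cellAt grid b ≠ "#" := by
      rcases reach_pass hR with rfl | h1
      · exact ⟨hs, hps⟩
      · exact h1
    exact Relation.ReflTransGen.head (kstep_symm hb.1 hb.2 hstep) ih

lemma conn_of_reach {N M : Int} {grid : List (List String)} {s t : Int × Int}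
    (hs : inbP N M s) (hps : cellAt grid s ≠ "#") (h : ReachP N M grid s t) :
    Conn N M grid (idxN M s) (idxN M t) := by
  induction h with
  | refl => exact Relation.EqvGen.refl _
  | @tail b v hR hstep ih =>
    have hb : inbP N M b ∧ cellAt grid b ≠ "#" := by
      rcases reach_pass hR with rfl | h1
      · exact ⟨hs, hps⟩
      · exact h1
    obtain ⟨⟨ab, habm, hveq⟩, hiv, hpv⟩ := hstep
    exact Relation.EqvGen.trans _ _ _ ih
      (Relation.EqvGen.rel _ _ ⟨b, v, hb.1, hiv, hb.2, hpv, ⟨ab, habm, hveq⟩, rfl, rfl⟩)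

lemma reach_of_conn {N M : Int} {grid : List (List String)} {a b : Nat}
    (h : Conn N M grid a b) :
    a = b ∨ ∃ u v : Int × Int, inbP N M u ∧ inbP N M v ∧ cellAt grid u ≠ "#" ∧
      cellAt grid v ≠ "#" ∧ idxN M u = a ∧ idxN M v = b ∧ ReachP N M grid u v := by
  induction h with
  | rel x y hxy =>
    obtain ⟨u, v, hu, hv, hpu, hpv, ⟨ab, habm, hveq⟩, rfl, rfl⟩ := hxy
    exact Or.inr ⟨u, v, hu, hv, hpu, hpv, rfl, rfl,
      Relation.ReflTransGen.single ⟨⟨ab, habm, hveq⟩, hv, hpv⟩⟩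
  | refl x => exact Or.inl rfl
  | symm x y _ ih =>
    rcases ih with h1 | ⟨u, v, hu, hv, hpu, hpv, ha, hb, hR⟩
    · exact Or.inl h1.symm
    · exact Or.inr ⟨v, u, hv, hu, hpv, hpu, hb, ha, reach_symm hu hpu hR⟩
  | trans x y z _ _ ih1 ih2 =>
    rcases ih1 with h1 | ⟨u, v, hu, hv, hpu, hpv, ha, hb, hR⟩
    · rcases ih2 with h2 | h2
      · exact Or.inl (h1.trans h2)
      · rw [h1]
        exact Or.inr h2
    · rcases ih2 with h2 | ⟨u', w, hu', hw, hpu', hpw, ha', hb', hR'⟩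
      · rw [← h2]
        exact Or.inr ⟨u, v, hu, hv, hpu, hpv, ha, hb, hR⟩
      · have hvv : v = u' := idxN_inj hv hu' (by rw [hb, ha'])
        exact Or.inr ⟨u, w, hu, hw, hpu, hpw, ha, hb',
          Relation.ReflTransGen.trans hR (by rwa [hvv])⟩

-- ----- B computes reachability -----
lemma solve_alt_iff (N M : Int) (grid : List (List String)) (h0N : 0 < N) (h0M : 0 < M) :
    solve_alt N M grid = true ↔ ReachP N M grid ((hlist N M grid).getD 0 (0, 0))
      ((hlist N M grid).getD 1 (0, 0)) := by
  have hs : inbP N M ((hlist N M grid).getD 0 (0, 0)) := getD_hlist_inb h0N h0M 0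
  have ht : inbP N M ((hlist N M grid).getD 1 (0, 0)) := getD_hlist_inb h0N h0M 1
  have hrw : solve_alt N M grid
      = decide (rootD (buildUF N M grid) (idxN M ((hlist N M grid).getD 0 (0, 0)))
        = rootD (buildUF N M grid) (idxN M ((hlist N M grid).getD 1 (0, 0)))) := rfl
  rw [hrw, decide_eq_true_iff, root_eq_iff_conn]
  rcases hlE : hlist N M grid with _ | ⟨h, tl⟩
  · simp only [List.getD_nil]
    constructor
    · intro _; exact Relation.ReflTransGen.refl
    · intro _; exact Relation.EqvGen.refl _
  · have hsmem : (hlist N M grid).getD 0 (0, 0) ∈ hlist N M grid := by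
      rw [hlE]; exact List.mem_cons_self
    have hcs : cellAt grid ((hlist N M grid).getD 0 (0, 0)) = "H" := hlist_cell hsmem
    have hps : cellAt grid ((hlist N M grid).getD 0 (0, 0)) ≠ "#" := by
      rw [hcs]; decide
    rw [← hlE] at *
    constructor
    · intro hcn
      rcases reach_of_conn hcn with h1 | ⟨u, v, hu, hv, _, _, ha, hb, hR⟩
      · have : (hlist N M grid).getD 0 (0, 0) = (hlist N M grid).getD 1 (0, 0) :=
          idxN_inj hs ht h1
        rw [← this]
        exact Relation.ReflTransGen.refl
      · have h2 : u = (hlist N M grid).getD 0 (0, 0) := idxN_inj hu hs ha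
        have h3 : v = (hlist N M grid).getD 1 (0, 0) := idxN_inj hv ht hb
        rwa [h2, h3] at hR
    · exact conn_of_reach hs hps

-- ===== VERDICT (by name: the statement is the Claim_ definition above) =====
theorem solve_spec : Claim_equal_solve := by
  intro N M grid _ hpre
  obtain ⟨h0N, h0M, _, _, _⟩ := hpre
  unfold Spec_solve
  exact Bool.coe_iff_coe.mp ((solve_iff N M grid h0N h0M).trans (solve_alt_iff N M grid h0N h0M).symm)
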